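-- pv_equiv track=rewrite | github.com/F4llerino/bundesliga-webscrapper | helper_funtions.py | duplicate_list_element
-- ===== SOURCE A (Python) =====
-- def duplicate_list_element(liste, element):
--     i = 0
--     while i < len(liste):
--         if liste[i] == element:
--             liste.insert(i + 1, element)
--             i += 1  # Überspringe das duplizierte Element, um Endlosschleifen zu vermeiden
--         i += 1
--     return liste
-- ===== SOURCE B (Python) =====
-- def duplicate_list_element(liste, element):
--     indices = [i for i, x in enumerate(liste) if x == element]
--     for i in reversed(indices):
--         liste.insert(i + 1, element)
--     return liste
-- ===== Notes on version B (the rewrite author's own statement) =====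
-- stated objective: alternative
-- what changed: Instead of one index-juggling while loop that rescans len(liste) every step and skips over freshly inserted copies, B first collects all match positions with enumerate, then inserts the duplicates back-to-front so earlier indices stay valid; like A it mutates liste in place and returns it.
import Mathlib
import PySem

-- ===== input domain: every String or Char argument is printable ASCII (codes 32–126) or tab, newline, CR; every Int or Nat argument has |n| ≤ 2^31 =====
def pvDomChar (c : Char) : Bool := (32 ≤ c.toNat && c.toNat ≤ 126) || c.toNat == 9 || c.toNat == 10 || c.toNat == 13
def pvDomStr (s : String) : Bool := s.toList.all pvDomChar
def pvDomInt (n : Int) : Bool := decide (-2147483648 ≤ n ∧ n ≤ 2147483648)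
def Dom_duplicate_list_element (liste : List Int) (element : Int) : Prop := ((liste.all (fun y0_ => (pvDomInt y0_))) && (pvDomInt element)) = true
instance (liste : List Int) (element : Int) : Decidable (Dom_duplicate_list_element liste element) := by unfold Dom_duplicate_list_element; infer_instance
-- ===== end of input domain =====

-- B replaces A's index-juggling while loop by collecting all match positions first and then
-- inserting the duplicates back-to-front (same in-place mutation, same return value); objective: alternative decomposition.

-- ===== PORT A =====
-- A's while loop: i scans the growing list, skipping the freshly inserted copy.
def dupLoopA (liste : List Int) (element : Int) (i : Nat) : List Int :=
  if h : i < liste.length then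
    if liste[i] == element then
      dupLoopA (PySem.List.insert liste ((i : Int) + 1) element) element (i + 2)
    else
      dupLoopA liste element (i + 1)
  else liste
termination_by liste.length - i
decreasing_by
  · simp only [PySem.List.length_insert]; omega
  · omega

def duplicate_list_element (liste : List Int) (element : Int) : List Int :=
  dupLoopA liste element 0

-- ===== PORT B =====
def duplicate_list_element_alt (liste : List Int) (element : Int) : List Int :=
  let indices := ((PySem.List.enumerate liste).filter (fun p => p.2 == element)).map (fun p => p.1)
  indices.reverse.foldl (fun acc i => PySem.List.insert acc (i + 1) element) liste

-- ===== PRECONDITION & SPEC =====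
def Spec_duplicate_list_element (liste : List Int) (element : Int) (out : List Int) : Prop := out = duplicate_list_element_alt liste element
instance (liste : List Int) (element : Int) (out : List Int) : Decidable (Spec_duplicate_list_element liste element out) := by unfold Spec_duplicate_list_element; infer_instance

-- ===== CLAIM (what is proved, stated in full; the proofs are below) =====
def Claim_equal_duplicate_list_element : Prop := ∀ (liste : List Int) (element : Int), Dom_duplicate_list_element liste element → Spec_duplicate_list_element liste element (duplicate_list_element liste element)

-- ===== LEMMAS AND PROOFS =====

-- canonical form: each occurrence of `e` doubled
def dup (e : Int) (l : List Int) : List Int := l.flatMap (fun x => if x = e then [x, x] else [x])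

theorem dup_nil (e : Int) : dup e [] = [] := rfl

theorem dup_cons (e a : Int) (l : List Int) :
    dup e (a :: l) = (if a = e then [a, a] else [a]) ++ dup e l := by
  simp [dup]

-- Python insert at a nonnegative in-or-out-of-range index commutes with cons
theorem ins_cons (a v : Int) (t : List Int) (n : Nat) :
    PySem.List.insert (a :: t) ((n : Int) + 2) v = a :: PySem.List.insert t ((n : Int) + 1) v := by
  simp only [PySem.List.insert, PySem.List.sliceIndices]
  have h1 : ¬ ((n : Int) + 2 < 0) := by omega
  have h2 : ¬ ((n : Int) + 1 < 0) := by omega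
  rw [if_neg h1, if_neg h2]
  have h : (min ((n : Int) + 2) ((↑t.length : Int) + 1)).toNat
      = (min ((n : Int) + 1) (↑t.length : Int)).toNat + 1 := by omega
  simp only [List.length_cons]
  push_cast
  rw [h]
  simp [List.take_succ_cons, List.drop_succ_cons]

theorem ins_one (a v : Int) (t : List Int) :
    PySem.List.insert (a :: t) 1 v = a :: v :: t := by
  rw [show (1 : Int) = ((1 : Nat) : Int) from rfl,
    PySem.List.insert_natCast _ _ _ (by simp)]
  simp

-- A's loop computes take i ++ dup (drop i)
theorem loopA_eq (liste : List Int) (element : Int) (i : Nat) :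
    dupLoopA liste element i = liste.take i ++ dup element (liste.drop i) := by
  fun_induction dupLoopA liste element i with
  | case1 liste i h heq ih =>
    have he : liste[i] = element := by simpa using heq
    have hle : i + 1 ≤ liste.length := h
    rw [ih]
    rw [show ((i : Int) + 1) = ((i + 1 : Nat) : Int) by push_cast; ring,
      PySem.List.insert_natCast _ _ _ hle]
    have htlen : (liste.take (i + 1)).length = i + 1 := by
      simp [List.length_take]; omega
    have h1 : (liste.take (i + 1) ++ element :: liste.drop (i + 1)).take (i + 2)
        = liste.take (i + 1) ++ [element] := by
      rw [show i + 2 = (liste.take (i + 1)).length + 1 by omega, List.take_append]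
      simp
    have h2 : (liste.take (i + 1) ++ element :: liste.drop (i + 1)).drop (i + 2)
        = liste.drop (i + 1) := by
      rw [show i + 2 = (liste.take (i + 1)).length + 1 by omega, List.drop_append]
      simp
    rw [h1, h2, List.drop_eq_getElem_cons h, dup_cons]
    simp [he, List.take_add_one, List.getElem?_eq_getElem h]
  | case2 liste i h heq ih =>
    have he : liste[i] ≠ element := by simpa using heq
    have ht : liste.take (i + 1) = liste.take i ++ [liste[i]] := by
      rw [List.take_add_one]
      simp [List.getElem?_eq_getElem h]
    rw [ih, List.drop_eq_getElem_cons h, dup_cons, if_neg he, ht, List.append_assoc]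
  | case3 liste i h =>
    have := Nat.le_of_not_lt h
    simp [List.take_of_length_le this, List.drop_of_length_le this, dup_nil]

-- index list of the occurrences of e, starting at s
theorem idxs_shift (e : Int) (l : List Int) : ∀ (s : Int),
    ((PySem.List.enumerate l (s + 1)).filter (fun p => p.2 == e)).map (fun p => p.1)
      = (((PySem.List.enumerate l s).filter (fun p => p.2 == e)).map (fun p => p.1)).map (· + 1) := by
  induction l with
  | nil => intro s; simp [PySem.List.enumerate_nil]
  | cons a t ih =>
    intro s
    rw [PySem.List.enumerate_cons, PySem.List.enumerate_cons]
    by_cases ha : a = e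
    · simp [ha, ih (s + 1)]
    · simp [ha, ih (s + 1)]

theorem idxs_nonneg (e : Int) (l : List Int) (s : Int) :
    ∀ i ∈ ((PySem.List.enumerate l s).filter (fun p => p.2 == e)).map (fun p => p.1), s ≤ i := by
  intro i hi
  simp only [List.mem_map] at hi
  obtain ⟨p, hp, rfl⟩ := hi
  have hp' := List.mem_of_mem_filter hp
  rw [PySem.List.mem_enumerate_iff] at hp'
  obtain ⟨k, hk, rfl⟩ := hp'
  simp

-- inserting the shifted indices into a :: acc leaves the head alone
theorem fold_shift (e : Int) (L : List Int) (hL : ∀ i ∈ L, 0 ≤ i) :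
    ∀ (a : Int) (acc : List Int),
      (L.map (· + 1)).foldl (fun acc i => PySem.List.insert acc (i + 1) e) (a :: acc)
        = a :: L.foldl (fun acc i => PySem.List.insert acc (i + 1) e) acc := by
  induction L with
  | nil => intro a acc; rfl
  | cons i t ih =>
    intro a acc
    have hi : 0 ≤ i := hL i (by simp)
    obtain ⟨n, hn⟩ : ∃ n : Nat, i = (n : Int) := ⟨i.toNat, (Int.toNat_of_nonneg hi).symm⟩
    simp only [List.map_cons, List.foldl_cons]
    rw [show i + 1 + 1 = (n : Int) + 2 by omega, ins_cons,
      show (n : Int) + 1 = i + 1 by omega]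
    exact ih (fun j hj => hL j (by simp [hj])) a _

-- B's fold computes dup
theorem foldB (e : Int) (l : List Int) :
    ((((PySem.List.enumerate l).filter (fun p => p.2 == e)).map (fun p => p.1)).reverse).foldl
      (fun acc i => PySem.List.insert acc (i + 1) e) l = dup e l := by
  induction l with
  | nil => simp [PySem.List.enumerate, dup_nil]
  | cons a t ih =>
    have hsh := idxs_shift e t 0
    rw [show PySem.List.enumerate (a :: t) = PySem.List.enumerate (a :: t) 0 from rfl,
      PySem.List.enumerate_cons]
    have hstep : ((( (0 : Int), a) :: PySem.List.enumerate t (0 + 1)).filter (fun p => p.2 == e)).map (fun p => p.1)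
        = (if a = e then [(0 : Int)] else [])
            ++ ((((PySem.List.enumerate t 0).filter (fun p => p.2 == e)).map (fun p => p.1)).map (· + 1)) := by
      by_cases ha : a = e <;>
        · simp only [List.filter_cons]
          simp [ha]
          simpa [List.map_map] using hsh
    rw [hstep, List.reverse_append, List.foldl_append, ← List.map_reverse]
    have hnonneg : ∀ i ∈ ((((PySem.List.enumerate t 0).filter (fun p => p.2 == e)).map (fun p => p.1)).reverse), 0 ≤ i :=
      fun i hi => idxs_nonneg e t 0 i (List.mem_reverse.mp hi)
    rw [fold_shift e _ hnonneg a t]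
    have ih' : (((((PySem.List.enumerate t 0).filter (fun p => p.2 == e)).map (fun p => p.1)).reverse)).foldl
        (fun acc i => PySem.List.insert acc (i + 1) e) t = dup e t := ih
    rw [ih', dup_cons]
    by_cases ha : a = e
    · subst ha
      simp [show (0 : Int) + 1 = 1 from rfl, ins_one]
    · simp [ha]

-- ===== VERDICT (by name: the statement is the Claim_ definition above) =====
theorem duplicate_list_element_spec : Claim_equal_duplicate_list_element := by
  intro liste element _
  unfold Spec_duplicate_list_element duplicate_list_element duplicate_list_element_alt
  rw [loopA_eq]
  simp only []
  rw [foldB]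
  simp [dup]
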